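-- pv_equiv track=rewrite | github.com/Debsen85/Leetcode | 3237.alt-and-tab-simulation.py | simulationResult
-- ===== SOURCE A (Python) =====
-- from typing import List
--
-- def simulationResult(windows: List[int], queries: List[int]) -> List[int]:
--     hashSet, answer = set(), []
--     for query in reversed(queries):
--         if query not in hashSet:
--             answer.append(query)
--             hashSet.add(query)
--     for window in windows:
--         if window not in hashSet:
--             answer.append(window)
--     return answer
-- ===== SOURCE B (Python) =====
-- from typing import List
--
-- def simulationResult(windows: List[int], queries: List[int]) -> List[int]:
--     # Forward simulation of the alt-tab MRU order: each query moves its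
--     # window to the front of an MRU list (removing it first if present).
--     mru = []
--     for q in queries:
--         if q in mru:
--             mru.remove(q)
--         mru.insert(0, q)
--     qset = set(mru)
--     return mru + [w for w in windows if w not in qset]
-- ===== Notes on version B (the rewrite author's own statement) =====
-- stated objective: alternative
-- what changed: Replaces A's reverse pass with a seen-set by a forward MRU simulation: each query is moved to the front of an explicit MRU list, so the distinct queries come out in last-occurrence-first order directly.
import Mathlib
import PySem

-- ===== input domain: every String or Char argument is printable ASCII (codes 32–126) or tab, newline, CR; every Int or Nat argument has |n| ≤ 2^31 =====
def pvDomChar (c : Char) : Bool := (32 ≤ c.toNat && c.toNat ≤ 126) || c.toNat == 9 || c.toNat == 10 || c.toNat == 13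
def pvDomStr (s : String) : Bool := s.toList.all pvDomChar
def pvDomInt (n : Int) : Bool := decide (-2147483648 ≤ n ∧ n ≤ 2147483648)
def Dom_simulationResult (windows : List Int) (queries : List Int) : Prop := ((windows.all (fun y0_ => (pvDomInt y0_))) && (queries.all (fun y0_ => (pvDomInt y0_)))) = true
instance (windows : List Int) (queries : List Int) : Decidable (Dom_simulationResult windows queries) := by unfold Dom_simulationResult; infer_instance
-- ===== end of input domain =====

-- B replaces A's reverse dedup pass (seen-set + append) by a forward MRU simulation
-- that moves each queried window to the front of an explicit MRU list (alternative decomposition).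


-- ===== PORT A =====
-- one step of A's first loop: skip seen queries, else append and record
def stepA (st : PySem.Set Int × List Int) (q : Int) : PySem.Set Int × List Int :=
  if st.1.contains q then st else (st.1.add q, st.2 ++ [q])

def simulationResult (windows : List Int) (queries : List Int) : List Int :=
  let st := queries.reverse.foldl stepA (PySem.Set.empty, [])
  windows.foldl (fun ans w => if st.1.contains w then ans else ans ++ [w]) st.2

-- ===== PORT B =====
-- one step of B's loop: remove q from the MRU list if present, then insert at the front
def mruStep (mru : List Int) (q : Int) : List Int :=
  q :: (if mru.contains q then (PySem.List.remove? mru q).getD mru else mru)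

def simulationResult_alt (windows : List Int) (queries : List Int) : List Int :=
  let mru := queries.foldl mruStep []
  let qset := PySem.Set.ofList mru
  mru ++ windows.filter (fun w => !(qset.contains w))

-- ===== PRECONDITION & SPEC =====
def Spec_simulationResult (windows : List Int) (queries : List Int) (out : List Int) : Prop := out = simulationResult_alt windows queries
instance (windows : List Int) (queries : List Int) (out : List Int) : Decidable (Spec_simulationResult windows queries out) := by unfold Spec_simulationResult; infer_instance

-- ===== CLAIM (what is proved, stated in full; the proofs are below) =====
def Claim_equal_simulationResult : Prop := ∀ (windows : List Int) (queries : List Int), Dom_simulationResult windows queries → Spec_simulationResult windows queries (simulationResult windows queries)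

-- ===== LEMMAS AND PROOFS =====

-- common specification: distinct elements of r, first occurrences first
def dfr : List Int → List Int
  | [] => []
  | a :: l => a :: (dfr l).filter (fun x => !(x == a))

theorem mem_dfr (x : Int) (r : List Int) : x ∈ dfr r ↔ x ∈ r := by
  induction r with
  | nil => simp [dfr]
  | cons a l ih =>
    simp [dfr, List.mem_filter]
    by_cases hx : x = a <;> simp [hx, ih]

theorem nodup_dfr (r : List Int) : (dfr r).Nodup := by
  induction r with
  | nil => simp [dfr]
  | cons a l ih =>
    simp only [dfr, List.nodup_cons]
    refine ⟨?_, ih.filter _⟩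
    intro h
    have := (List.mem_filter.mp h).2
    simp at this

theorem mruStep_eq (m : List Int) (a : Int) (h : m.Nodup) :
    mruStep m a = a :: m.filter (fun x => !(x == a)) := by
  unfold mruStep
  by_cases hc : a ∈ m
  · have hcc : m.contains a = true := by simpa using hc
    rw [hcc, if_pos rfl, PySem.List.remove?_eq_some_erase m a hc]
    simp only [Option.getD_some]
    congr 1
    rw [List.Nodup.erase_eq_filter h a]
    apply List.filter_congr
    intro x _
    simp [bne]
  · have hcc : m.contains a = false := by simpa using hc
    rw [hcc]
    simp only [Bool.false_eq_true, if_false]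
    congr 1
    symm
    apply List.filter_eq_self.mpr
    intro x hx
    simp only [Bool.not_eq_eq_eq_not, Bool.not_true, beq_eq_false_iff_ne, ne_eq]
    rintro rfl
    exact hc hx

-- B's loop over queries computes dfr of the reversed queries
theorem lemB (r : List Int) : r.reverse.foldl mruStep [] = dfr r := by
  induction r with
  | nil => rfl
  | cons a l ih =>
    simp only [List.reverse_cons, List.foldl_append, List.foldl_cons, List.foldl_nil, ih]
    exact mruStep_eq _ _ (nodup_dfr l)

-- A's first loop: the set component is Set.update
theorem lemA_set (r : List Int) : ∀ (s : PySem.Set Int) (ans : List Int),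
    (r.foldl stepA (s, ans)).1 = PySem.Set.update s r := by
  induction r with
  | nil => intro s ans; simp [PySem.Set.update]
  | cons a l ih =>
    intro s ans
    simp only [List.foldl_cons, stepA]
    by_cases hc : s.contains a = true
    · rw [if_pos hc]
      have hadd : PySem.Set.add s a = s := by unfold PySem.Set.add; rw [if_pos hc]
      rw [ih]
      simp [PySem.Set.update, hadd]
    · rw [if_neg hc, ih]
      simp [PySem.Set.update]

-- A's first loop: the answer component appends the unseen first occurrences
theorem lemA_ans (r : List Int) : ∀ (s : PySem.Set Int) (ans : List Int),
    (r.foldl stepA (s, ans)).2 = ans ++ (dfr r).filter (fun x => !(s.contains x)) := by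
  induction r with
  | nil => intro s ans; simp [dfr]
  | cons a l ih =>
    intro s ans
    simp only [List.foldl_cons, stepA, dfr]
    by_cases hc : s.contains a = true
    · rw [if_pos hc, ih]
      congr 1
      rw [List.filter_cons]
      simp only [hc, Bool.not_true]
      rw [if_neg (by simp), List.filter_filter]
      apply List.filter_congr
      intro x _
      by_cases hx : x = a
      · subst hx
        have hm : x ∈ s := by simpa using hc
        simp [hm]
      · simp [hx]
    · rw [if_neg hc, ih]
      have hca : s.contains a = false := by simpa using hc
      simp only [List.filter_cons, hca, Bool.not_false, if_pos, List.append_assoc,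
        List.singleton_append]
      congr 2
      rw [List.filter_filter]
      apply List.filter_congr
      intro x _
      by_cases hx : x = a
      · subst hx
        have h1 : (PySem.Set.add s x).contains x = true := by
          simp [(PySem.Set.mem_add s x x).mpr (Or.inr rfl)]
        rw [h1]
        simp
      · by_cases hxs : x ∈ s
        · have h1 : (PySem.Set.add s a).contains x = true := by
            simpa using (PySem.Set.mem_add s a x).mpr (Or.inl hxs)
          have h2 : s.contains x = true := by simpa using hxs
          rw [h1, h2]
          simp
        · have h1 : (PySem.Set.add s a).contains x = false := by
            rw [Bool.eq_false_iff]
            intro hcon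
            rcases (PySem.Set.mem_add s a x).mp (by simpa using hcon) with h | h
            · exact hxs h
            · exact hx h
          have h2 : s.contains x = false := by
            rw [Bool.eq_false_iff]
            intro hcon
            exact hxs (by simpa using hcon)
          rw [h1, h2]
          simp [hx]

-- A's second loop as a filter-append
theorem loop2_eq (p : Int → Bool) (ws : List Int) : ∀ (ans : List Int),
    ws.foldl (fun ans w => if p w then ans else ans ++ [w]) ans
      = ans ++ ws.filter (fun w => !(p w)) := by
  induction ws with
  | nil => intro ans; simp
  | cons w ws ih =>
    intro ans
    simp only [List.foldl_cons, List.filter_cons]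
    by_cases hw : p w = true
    · simp [hw, ih]
    · have : p w = false := by simpa using hw
      simp [this, ih]

theorem contains_eq_of_mem_iff (s t : List Int) (h : ∀ x, x ∈ s ↔ x ∈ t) (x : Int) :
    s.contains x = t.contains x := by
  by_cases hx : x ∈ s
  · have h1 : s.contains x = true := by simpa using hx
    have h2 : t.contains x = true := by simpa using (h x).mp hx
    rw [h1, h2]
  · have hx' : x ∉ t := fun hm => hx ((h x).mpr hm)
    have h1 : s.contains x = false := by simpa using hx
    have h2 : t.contains x = false := by simpa using hx'
    rw [h1, h2]

-- ===== VERDICT (by name: the statement is the Claim_ definition above) =====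
theorem simulationResult_spec : Claim_equal_simulationResult := by
  intro windows queries _
  unfold Spec_simulationResult
  have hB : queries.foldl mruStep [] = dfr queries.reverse := by
    simpa using lemB queries.reverse
  have h1 := lemA_set queries.reverse PySem.Set.empty []
  have h2 := lemA_ans queries.reverse PySem.Set.empty []
  show (windows.foldl
      (fun ans w =>
        if (queries.reverse.foldl stepA (PySem.Set.empty, [])).1.contains w then ans
        else ans ++ [w])
      ((queries.reverse.foldl stepA (PySem.Set.empty, [])).2))
      = (queries.foldl mruStep [])
          ++ windows.filter (fun w => !((PySem.Set.ofList (queries.foldl mruStep [])).contains w))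
  rw [h1, h2, hB, PySem.Set.ofList_eq_self_of_nodup _ (nodup_dfr _), loop2_eq]
  have hans : ([] : List Int) ++ (dfr queries.reverse).filter
      (fun x => !(PySem.Set.contains PySem.Set.empty x)) = dfr queries.reverse := by
    simp [PySem.Set.contains, PySem.Set.empty]
  rw [hans]
  congr 1
  apply List.filter_congr
  intro w _
  congr 1
  apply contains_eq_of_mem_iff
  intro x
  rw [mem_dfr]
  show x ∈ PySem.Set.update [] queries.reverse ↔ x ∈ queries.reverse
  rw [PySem.Set.update_nil_left, PySem.Set.mem_ofList]
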